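-- pv_equiv track=rewrite | github.com/milton-villegas/protein_stability | core/design_factory.py | _generate_full_factorial
-- ===== SOURCE A (Python) =====
-- import itertools
-- from typing import Dict, List, Tuple, Optional, Any
--
-- def _generate_full_factorial(
--
--     factors: Dict[str, List[str]]
-- ) -> List[Dict[str, Any]]:
--     """
--     Generate full factorial design (all combinations).
--
--     Args:
--         factors: Dictionary of factor_name → list of levels
--
--     Returns:
--         List of design points
--
--     Examples:
--         >>> factory = DesignFactory()
--         >>> factors = {"A": ["1", "2"], "B": ["x", "y"]}
--         >>> design = factory._generate_full_factorial(factors)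
--         >>> len(design)
--         4
--     """
--     factor_names = list(factors.keys())
--     level_lists = [factors[f] for f in factor_names]
--     combinations = list(itertools.product(*level_lists))
--
--     design_points = []
--     for combo in combinations:
--         point = {factor_names[i]: combo[i] for i in range(len(factor_names))}
--         design_points.append(point)
--
--     return design_points
-- ===== SOURCE B (Python) =====
-- def _generate_full_factorial(factors):
--     """Full factorial design by mixed-radix decoding: enumerate a single flat
--     counter 0..total-1 and decode each index into one digit per factor."""
--     names = list(factors)
--     sizes = [len(factors[n]) for n in names]
--     total = 1
--     for s in sizes:
--         total *= s
--     design = []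
--     for idx in range(total):
--         digits = [0] * len(names)
--         rem = idx
--         for j in range(len(names) - 1, -1, -1):
--             rem, digits[j] = divmod(rem, sizes[j])
--         design.append({n: factors[n][d] for n, d in zip(names, digits)})
--     return design
-- ===== Notes on version B (the rewrite author's own statement) =====
-- stated objective: alternative
-- what changed: Replaces itertools.product enumeration of combination tuples by mixed-radix arithmetic: a single flat counter 0..total-1 is decoded with divmod into one digit per factor, each digit indexing that factor's level list.
import Mathlib
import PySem

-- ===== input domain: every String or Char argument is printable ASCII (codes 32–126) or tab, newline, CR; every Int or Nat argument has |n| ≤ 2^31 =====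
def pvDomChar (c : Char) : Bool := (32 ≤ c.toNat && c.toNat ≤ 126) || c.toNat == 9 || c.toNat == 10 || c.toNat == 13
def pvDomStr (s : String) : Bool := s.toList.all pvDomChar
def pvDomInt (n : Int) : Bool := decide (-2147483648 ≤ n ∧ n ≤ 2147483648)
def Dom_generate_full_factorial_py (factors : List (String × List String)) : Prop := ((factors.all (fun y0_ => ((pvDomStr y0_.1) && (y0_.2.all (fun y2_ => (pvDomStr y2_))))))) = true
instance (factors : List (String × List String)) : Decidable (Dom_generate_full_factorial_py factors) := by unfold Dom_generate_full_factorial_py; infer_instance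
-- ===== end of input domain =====

-- B replaces itertools.product enumeration of combination tuples by mixed-radix
-- arithmetic: one flat counter decoded by divmod into a digit per factor
-- (alternative algorithm, same cost).

-- ===== PORT A =====
-- itertools.product(*level_lists): rightmost factor varies fastest
def pvProd (pools : List (List String)) : List (List String) :=
  pools.foldr (fun pool acc => pool.flatMap (fun y => acc.map (fun c => y :: c))) [[]]

-- the dict comprehension {factor_names[i]: combo[i] for i in range(len(factor_names))}
def pvMkPoint (names combo : List String) : List (String × String) :=
  ((PySem.List.pyRange 0 (names.length : Int) 1).foldl
    (fun pt i => pt.insert (PySem.List.pyGetD names i "") (PySem.List.pyGetD combo i ""))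
    (PySem.Dict.empty : PySem.Dict String String)).items

def generate_full_factorial_py (factors : List (String × List String)) : List (List (String × String)) :=
  let d := PySem.Dict.ofList factors
  let factor_names := d.keys
  let level_lists := factor_names.map (fun f => d.getD f [])
  let combinations := pvProd level_lists
  combinations.foldl (fun dps combo => dps ++ [pvMkPoint factor_names combo]) []

-- ===== PORT B =====
-- the inner loop 'for j in range(len(names)-1, -1, -1): rem, digits[j] = divmod(rem, sizes[j])':
-- state = (rem, digits built so far); walking j downwards is folding over the reversed sizes,
-- prepending each new digit (every slot of the prefilled digits list is overwritten exactly once)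
def pvDecode (sizes : List Int) (idx : Int) : Int × List Int :=
  sizes.reverse.foldl
    (fun st s => (PySem.Int.floordiv st.1 s, PySem.Int.mod st.1 s :: st.2)) (idx, [])

def generate_full_factorial_py_alt (factors : List (String × List String)) : List (List (String × String)) :=
  let d := PySem.Dict.ofList factors
  let names := d.keys
  let sizes := names.map (fun n => ((d.getD n []).length : Int))
  let total := sizes.foldl (· * ·) 1
  (PySem.List.pyRange 0 total 1).foldl
    (fun design idx =>
      let digits := (pvDecode sizes idx).2
      design ++ [((names.zip digits).foldl
        (fun pt p => pt.insert p.1 (PySem.List.pyGetD (d.getD p.1 []) p.2 ""))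
        (PySem.Dict.empty : PySem.Dict String String)).items]) []

-- ===== PRECONDITION & SPEC =====
def Spec_generate_full_factorial_py (factors : List (String × List String)) (out : List (List (String × String))) : Prop := out = generate_full_factorial_py_alt factors
instance (factors : List (String × List String)) (out : List (List (String × String))) : Decidable (Spec_generate_full_factorial_py factors out) := by unfold Spec_generate_full_factorial_py; infer_instance

-- ===== CLAIM (what is proved, stated in full; the proofs are below) =====
def Claim_equal_generate_full_factorial_py : Prop := ∀ (factors : List (String × List String)), Dom_generate_full_factorial_py factors → Spec_generate_full_factorial_py factors (generate_full_factorial_py factors)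

-- ===== LEMMAS AND PROOFS =====

-- number of combinations, on the Nat side
def pvTotal (pools : List (List String)) : Nat :=
  (pools.map List.length).prod

-- the combination B's decoded digits select from the pools
def pvComb (pools : List (List String)) (idx : Int) : List String :=
  List.zipWith (fun pool dg => PySem.List.pyGetD pool dg "")
    pools ((pvDecode (pools.map (fun l => (l.length : Int))) idx).2)

lemma pvTotal_cons (l : List String) (ls : List (List String)) :
    pvTotal (l :: ls) = l.length * pvTotal ls := by
  simp [pvTotal]

lemma pvFoldlSizes (pools : List (List String)) : ∀ (a : Int),
    (pools.map (fun l => (l.length : Int))).foldl (· * ·) a = a * ((pvTotal pools : Nat) : Int) := by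
  induction pools with
  | nil => intro a; simp [pvTotal]
  | cons l ls ih =>
    intro a
    rw [List.map_cons, List.foldl_cons, ih (a * ((l.length : Nat) : Int)), pvTotal_cons]
    push_cast
    ring

lemma pvDecode_cons (s : Int) (ss : List Int) (idx : Int) :
    pvDecode (s :: ss) idx
      = (PySem.Int.floordiv (pvDecode ss idx).1 s,
         PySem.Int.mod (pvDecode ss idx).1 s :: (pvDecode ss idx).2) := by
  simp [pvDecode, List.foldl_append]

lemma pvDecode_length (sizes : List Int) (idx : Int) :
    (pvDecode sizes idx).2.length = sizes.length := by
  induction sizes with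
  | nil => rfl
  | cons s ss ih => rw [pvDecode_cons]; simp [ih]

lemma pvDecode_split (ls : List (List String)) :
    ∀ (q r : Nat), r < pvTotal ls →
      pvDecode (ls.map (fun l => (l.length : Int))) ((q * pvTotal ls + r : Nat) : Int)
        = ((q : Int), (pvDecode (ls.map (fun l => (l.length : Int))) ((r : Nat) : Int)).2) := by
  induction ls with
  | nil =>
    intro q r hr
    have hr0 : r = 0 := by simpa [pvTotal] using hr
    subst hr0
    simp [pvDecode, pvTotal]
  | cons l ls ih =>
    intro q r hr
    rw [pvTotal_cons] at hr ⊢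
    have hprod : 0 < l.length * pvTotal ls := lt_of_le_of_lt (Nat.zero_le r) hr
    have hspos : 0 < l.length := by
      rcases Nat.eq_zero_or_pos l.length with h0 | h
      · rw [h0, Nat.zero_mul] at hprod; exact absurd hprod (lt_irrefl 0)
      · exact h
    have hTpos : 0 < pvTotal ls := by
      rcases Nat.eq_zero_or_pos (pvTotal ls) with h0 | h
      · rw [h0, Nat.mul_zero] at hprod; exact absurd hprod (lt_irrefl 0)
      · exact h
    have hsplit : r = r / pvTotal ls * pvTotal ls + r % pvTotal ls := by
      rw [Nat.mul_comm]; exact (Nat.div_add_mod r (pvTotal ls)).symm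
    have hr1 : r / pvTotal ls < l.length :=
      Nat.div_lt_of_lt_mul (by rwa [Nat.mul_comm] at hr)
    have hr0 : r % pvTotal ls < pvTotal ls := Nat.mod_lt _ hTpos
    have e1 : q * (l.length * pvTotal ls) + r
        = (q * l.length + r / pvTotal ls) * pvTotal ls + r % pvTotal ls := by
      conv_lhs => rw [hsplit]
      ring
    rw [List.map_cons, pvDecode_cons, pvDecode_cons, e1,
      ih (q * l.length + r / pvTotal ls) (r % pvTotal ls) hr0]
    conv_rhs => rw [hsplit, ih (r / pvTotal ls) (r % pvTotal ls) hr0]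
    rw [PySem.Int.floordiv_natCast, PySem.Int.mod_natCast,
      PySem.Int.floordiv_natCast, PySem.Int.mod_natCast]
    have h1 : (q * l.length + r / pvTotal ls) / l.length = q := by
      rw [Nat.mul_comm q l.length, Nat.mul_add_div hspos, Nat.div_eq_of_lt hr1, Nat.add_zero]
    have h2 : (q * l.length + r / pvTotal ls) % l.length = r / pvTotal ls := by
      rw [Nat.mul_comm q l.length, Nat.mul_add_mod, Nat.mod_eq_of_lt hr1]
    have h3 : r / pvTotal ls % l.length = r / pvTotal ls := Nat.mod_eq_of_lt hr1
    rw [h1, h2, h3]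

lemma pvRange_mul (s T : Nat) :
    List.range (s * T) = (List.range s).flatMap (fun q => (List.range T).map (fun r => q * T + r)) := by
  induction s with
  | zero => simp
  | succ n ih =>
    rw [Nat.succ_mul, List.range_add, List.range_succ, List.flatMap_append, ← ih]
    simp

lemma pvGetD_range_map (l : List String) :
    (List.range l.length).map (fun i => l.getD i "") = l := by
  induction l with
  | nil => rfl
  | cons x xs ih =>
    rw [List.length_cons, List.range_succ_eq_map, List.map_cons, List.map_map]
    simpa using ih

lemma pvProd_cons (l : List String) (ls : List (List String)) :
    pvProd (l :: ls) = l.flatMap (fun y => (pvProd ls).map (fun c => y :: c)) := rfl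

lemma pvProd_length {ls : List (List String)} {c : List String}
    (hc : c ∈ pvProd ls) : c.length = ls.length := by
  induction ls generalizing c with
  | nil => simp [pvProd] at hc; simp [hc]
  | cons l rest ih =>
    rw [pvProd_cons] at hc
    simp only [List.mem_flatMap, List.mem_map] at hc
    obtain ⟨y, _, c', hc', rfl⟩ := hc
    simp [ih hc']

lemma pvCore (pools : List (List String)) :
    (List.range (pvTotal pools)).map (fun k => pvComb pools ((k : Nat) : Int)) = pvProd pools := by
  induction pools with
  | nil => simp [pvTotal, pvComb, pvProd, pvDecode]
  | cons l ls ih =>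
    rw [pvTotal_cons, pvRange_mul, List.map_flatMap]
    have hstep : ∀ q ∈ List.range l.length,
        ((List.range (pvTotal ls)).map (fun r => q * pvTotal ls + r)).map
            (fun k => pvComb (l :: ls) ((k : Nat) : Int))
          = (List.range (pvTotal ls)).map
              (fun r => l.getD q "" :: pvComb ls ((r : Nat) : Int)) := by
      intro q hq
      rw [List.map_map]
      refine List.map_congr_left (fun r hr => ?_)
      have hq' : q < l.length := List.mem_range.mp hq
      have hr' : r < pvTotal ls := List.mem_range.mp hr
      have hd := pvDecode_split ls q r hr'
      show pvComb (l :: ls) ((q * pvTotal ls + r : Nat) : Int)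
        = l.getD q "" :: pvComb ls ((r : Nat) : Int)
      unfold pvComb
      rw [List.map_cons, pvDecode_cons, hd]
      rw [show ((q : Int), (pvDecode (ls.map (fun l => (l.length : Int))) ((r : Nat) : Int)).2).1
          = ((q : Nat) : Int) from rfl]
      rw [PySem.Int.mod_natCast q l.length, Nat.mod_eq_of_lt hq',
        List.zipWith_cons_cons, PySem.List.pyGetD_natCast l q "",
        List.getD_eq_getElem?_getD]
    rw [List.flatMap_congr hstep, pvProd_cons, ← ih]
    conv_rhs => rw [← pvGetD_range_map l]
    rw [List.flatMap_map]
    refine List.flatMap_congr (fun q _ => ?_)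
    simp [List.map_map]

-- A's dict comprehension, as a zip
lemma pvMkPoint_eq_zip {names combo : List String}
    (hnd : names.Nodup) (hlen : combo.length = names.length) :
    pvMkPoint names combo = names.zip combo := by
  unfold pvMkPoint
  rw [PySem.Dict.items_foldl_insert_fresh _ _ _ _ ?_ ?_]
  · have hmap : (PySem.List.pyRange 0 (names.length : Int) 1).map
        (fun i => ((PySem.List.pyGetD names i ""), (PySem.List.pyGetD combo i "")))
        = (names.zip combo) := by
      rw [← List.zip_map']
      rw [PySem.List.map_pyGetD_pyRange_zero' names ""]
      rw [show (names.length : Int) = (combo.length : Int) by exact_mod_cast hlen.symm]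
      rw [PySem.List.map_pyGetD_pyRange_zero' combo ""]
    rw [hmap]
    rfl
  · intro a _; exact PySem.Dict.contains_empty _
  · rw [PySem.List.map_pyGetD_pyRange_zero' names ""]; exact hnd

-- B's dict comprehension over zip names digits, as a zip
lemma pvZipMap (g : String → Int → String) :
    ∀ (names : List String) (digits : List Int),
      (names.zip digits).map (fun p => (p.1, g p.1 p.2))
        = names.zip (List.zipWith g names digits) := by
  intro names
  induction names with
  | nil => intro digits; rfl
  | cons n ns ih =>
    intro digits
    cases digits with
    | nil => rfl
    | cons dg dgs => simp [ih dgs]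

lemma pvBPoint (d : PySem.Dict String (List String)) (digits : List Int)
    (hnd : d.keys.Nodup) (hlen : digits.length = d.keys.length) :
    ((d.keys.zip digits).foldl
        (fun pt p => pt.insert p.1 (PySem.List.pyGetD (d.getD p.1 []) p.2 ""))
        (PySem.Dict.empty : PySem.Dict String String)).items
      = d.keys.zip (List.zipWith (fun pool dg => PySem.List.pyGetD pool dg "")
          (d.keys.map (fun n => d.getD n [])) digits) := by
  have hfst : (d.keys.zip digits).map Prod.fst = d.keys :=
    List.map_fst_zip hlen.ge
  rw [PySem.Dict.items_foldl_insert_fresh _ _ _ _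
      (fun a _ => PySem.Dict.contains_empty _) (by rw [hfst]; exact hnd)]
  rw [show (PySem.Dict.empty : PySem.Dict String String).items = [] from rfl, List.nil_append]
  rw [pvZipMap (fun n dg => PySem.List.pyGetD (d.getD n []) dg ""), List.zipWith_map_left]

-- ===== VERDICT (by name: the statement is the Claim_ definition above) =====
theorem generate_full_factorial_py_spec : Claim_equal_generate_full_factorial_py := by
  intro factors _
  unfold Spec_generate_full_factorial_py
  simp only [generate_full_factorial_py, generate_full_factorial_py_alt]
  rw [PySem.List.foldl_append_singleton_eq_map, PySem.List.foldl_append_singleton_eq_map]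
  have hnd : (PySem.Dict.ofList factors).keys.Nodup := PySem.Dict.nodup_keys_ofList factors
  set d := PySem.Dict.ofList factors with hd
  set names := d.keys with hnames
  set pools := names.map (fun n => d.getD n []) with hpools
  have hsizes : names.map (fun n => ((d.getD n []).length : Int))
      = pools.map (fun l => (l.length : Int)) := by rw [hpools, List.map_map]; rfl
  have htotal : (names.map (fun n => ((d.getD n []).length : Int))).foldl (· * ·) 1
      = ((pvTotal pools : Nat) : Int) := by
    rw [hsizes, pvFoldlSizes pools 1, one_mul]
  rw [htotal, PySem.List.pyRange_one]
  have hrange : ((((pvTotal pools : Nat) : Int) - 0).toNat) = pvTotal pools := by simp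
  rw [hrange, List.map_map]
  have hA : (pvProd pools).map (fun combo => pvMkPoint names combo)
      = (pvProd pools).map (fun combo => names.zip combo) := by
    refine List.map_congr_left (fun c hc => ?_)
    exact pvMkPoint_eq_zip hnd (by rw [pvProd_length hc, hpools, List.length_map])
  rw [hA]
  have hB : ∀ (k : Nat),
      (((names.zip ((pvDecode (names.map (fun n => ((d.getD n []).length : Int))) ((0 : Int) + (k : Nat))).2)).foldl
        (fun pt p => pt.insert p.1 (PySem.List.pyGetD (d.getD p.1 []) p.2 ""))
        (PySem.Dict.empty : PySem.Dict String String)).items)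
      = names.zip (pvComb pools ((k : Nat) : Int)) := by
    intro k
    rw [show ((0 : Int) + ((k : Nat) : Int)) = ((k : Nat) : Int) by ring, hsizes]
    rw [pvBPoint d _ hnd (by rw [pvDecode_length]; rw [List.length_map, hpools, List.length_map])]
    rfl
  calc (pvProd pools).map (fun combo => names.zip combo)
      = ((List.range (pvTotal pools)).map (fun k => pvComb pools ((k : Nat) : Int))).map
          (fun c => names.zip c) := by rw [pvCore]
    _ = (List.range (pvTotal pools)).map (fun k => names.zip (pvComb pools ((k : Nat) : Int))) := by
          rw [List.map_map]; rfl
    _ = _ := by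
          refine (List.map_congr_left (fun k _ => ?_)).symm
          exact hB k
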